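-- pv_equiv track=rewrite | github.com/Galuf1/algo-anagrams-ii | python/anagram2.py | anagrams_for
-- ===== SOURCE A (Python) =====
-- def anagrams_for(word, list_of_words):
-- 		# create a function to filter if the iterator equals word
-- 		def filter_anagram(str1):
-- 			# create lists with string to be able to mutate them
-- 			list1 = list(word)
-- 			list2 = list(str1)
-- 			for i in list1:
-- 				if i in list2:
-- 					#remove the character from list2 if it is in word
-- 					list2.remove(i)
-- 			# should be equal if they match length and characters
-- 			if len(list2) == 0:
-- 				return True
-- 		# filter using the list generates an iterator that has to be converted into a list
-- 		result_iterator = filter(filter_anagram,list_of_words )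
-- 		result = list(result_iterator)
--
-- 		return result
-- ===== SOURCE B (Python) =====
-- def anagrams_for(word, list_of_words):
--     wl = list(word)
--     return [s for s in list_of_words
--             if all(list(s).count(c) <= wl.count(c) for c in s)]
-- ===== Notes on version B (the rewrite author's own statement) =====
-- stated objective: simpler
-- what changed: Replaced the destructive remove-one-char-at-a-time loop over a mutable copy of the candidate with a direct per-character count comparison (candidate kept iff every character occurs at most as often as in word), written as a one-line comprehension.
import Mathlib
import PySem

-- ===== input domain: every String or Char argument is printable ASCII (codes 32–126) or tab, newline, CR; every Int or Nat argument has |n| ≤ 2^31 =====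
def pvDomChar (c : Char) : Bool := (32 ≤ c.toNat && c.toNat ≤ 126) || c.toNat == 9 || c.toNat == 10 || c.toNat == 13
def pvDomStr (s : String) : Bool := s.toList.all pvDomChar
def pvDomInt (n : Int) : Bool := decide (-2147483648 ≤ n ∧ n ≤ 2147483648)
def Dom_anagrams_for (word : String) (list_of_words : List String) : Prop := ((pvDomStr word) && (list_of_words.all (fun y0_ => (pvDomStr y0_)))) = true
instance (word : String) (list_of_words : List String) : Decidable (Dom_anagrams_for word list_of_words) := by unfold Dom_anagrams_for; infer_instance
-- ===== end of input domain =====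

-- B replaces A's destructive remove-a-char-at-a-time loop with a direct per-character
-- count comparison (simpler, one comprehension); proved to return the same list.


-- ===== PORT A =====
-- filter_anagram: copies word and the candidate into lists, removes each char of
-- word from the candidate's copy if present, keeps the candidate iff nothing is left.
def pvA_filter_anagram (word : String) (str1 : String) : Bool :=
  let list1 := word.toList
  let list2 := str1.toList
  let list2 := list1.foldl
    (fun l2 i => if i ∈ l2 then (PySem.List.remove? l2 i).getD l2 else l2) list2
  list2.length == 0

def anagrams_for (word : String) (list_of_words : List String) : List String :=
  list_of_words.filter (pvA_filter_anagram word)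

-- ===== PORT B =====
def anagrams_for_alt (word : String) (list_of_words : List String) : List String :=
  let wl := word.toList
  list_of_words.filter (fun s =>
    s.toList.all (fun c => s.toList.count c ≤ wl.count c))

-- ===== PRECONDITION & SPEC =====
def Spec_anagrams_for (word : String) (list_of_words : List String) (out : List String) : Prop := out = anagrams_for_alt word list_of_words
instance (word : String) (list_of_words : List String) (out : List String) : Decidable (Spec_anagrams_for word list_of_words out) := by unfold Spec_anagrams_for; infer_instance

-- ===== CLAIM (what is proved, stated in full; the proofs are below) =====
def Claim_equal_anagrams_for : Prop := ∀ (word : String) (list_of_words : List String), Dom_anagrams_for word list_of_words → Spec_anagrams_for word list_of_words (anagrams_for word list_of_words)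

-- ===== LEMMAS AND PROOFS =====

-- each char i of word removes one occurrence of i (if any); so for every char c,
-- the fold's result holds (count in candidate) - (count in word) occurrences of c.
lemma pv_count_fold (ws : List Char) (l2 : List Char) (c : Char) :
    (ws.foldl (fun l2 i => if i ∈ l2 then (PySem.List.remove? l2 i).getD l2 else l2) l2).count c
      = l2.count c - ws.count c := by
  induction ws generalizing l2 with
  | nil => simp
  | cons i ws ih =>
    simp only [List.foldl_cons, ih, List.count_cons]
    by_cases hmem : i ∈ l2
    · rw [if_pos hmem, PySem.List.remove?_eq_some_erase l2 i hmem]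
      simp only [Option.getD_some]
      rcases eq_or_ne c i with rfl | hne
      · have h1 : 0 < l2.count c := List.count_pos_iff.mpr hmem
        rw [List.count_erase_self]
        simp only [BEq.rfl, if_true]
        omega
      · rw [List.count_erase_of_ne hne]
        have : (i == c) = false := beq_false_of_ne (Ne.symm hne)
        simp [this]
    · rw [if_neg hmem]
      rcases eq_or_ne c i with rfl | hne
      · have h0 : l2.count c = 0 := List.count_eq_zero.mpr hmem
        simp [h0]
      · have : (i == c) = false := beq_false_of_ne (Ne.symm hne)
        simp [this]

lemma pv_pred_eq (word s : String) :
    pvA_filter_anagram word s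
      = s.toList.all (fun c => s.toList.count c ≤ word.toList.count c) := by
  unfold pvA_filter_anagram
  rw [Bool.eq_iff_iff]
  simp only [beq_iff_eq, List.length_eq_zero_iff, List.all_eq_true, decide_eq_true_eq]
  constructor
  · intro hnil c hc
    have hcnt := pv_count_fold word.toList s.toList c
    rw [hnil, List.count_nil] at hcnt
    have hpos : 0 < s.toList.count c := List.count_pos_iff.mpr hc
    omega
  · intro h
    rw [List.eq_nil_iff_forall_not_mem]
    intro c hc
    have hcnt := pv_count_fold word.toList s.toList c
    have hpos : 0 < (word.toList.foldl
        (fun l2 i => if i ∈ l2 then (PySem.List.remove? l2 i).getD l2 else l2) s.toList).count c :=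
      List.count_pos_iff.mpr hc
    rw [hcnt] at hpos
    have hcs : c ∈ s.toList := List.count_pos_iff.mp (by omega)
    have := h c hcs
    omega

-- ===== VERDICT (by name: the statement is the Claim_ definition above) =====
theorem anagrams_for_spec : Claim_equal_anagrams_for := by
  intro word list_of_words _
  unfold Spec_anagrams_for anagrams_for anagrams_for_alt
  exact List.filter_congr (fun s _ => pv_pred_eq word s)
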